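-- pv_equiv track=rewrite | github.com/AnonymousAuthors552/SpecCFA | hw/logs/gps_experiments/test_files/validate.py | validate_optimized
-- ===== SOURCE A (Python) =====
-- def validate_optimized(subpaths, baseline, optimized):
--     unoptimized = []
--     i = 0
--     while i < len(optimized):
--         if optimized[i].startswith('1111'):
--             # subpath id
--             subpath = subpaths[optimized[i]][:]
--             if i + 1 < len(optimized) and optimized[i+1].startswith('0000'):
--                 # parse counter
--                 count = int(optimized[i+1], 16)
--                 subpath *= count
--                 i += 1
--             unoptimized.extend(subpath)
--         else:
--             # keep element as-is
--             unoptimized.append(optimized[i])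
--         i += 1
--
--     # Replace subpath ids in the baseline list
--     baseline = [subpaths[subpath] if subpath.startswith('1111') else subpath for subpath in baseline]
--
--     return unoptimized == baseline, unoptimized
-- ===== SOURCE B (Python) =====
-- def validate_optimized(subpaths, baseline, optimized):
--     unoptimized = []
--     pending = None
--     for tok in optimized:
--         if tok.startswith('1111'):
--             if pending is not None:
--                 unoptimized.extend(pending)
--             pending = subpaths[tok][:]
--         elif tok.startswith('0000'):
--             if pending is not None:
--                 unoptimized.extend(pending * int(tok, 16))
--                 pending = None
--             else:
--                 unoptimized.append(tok)
--         else: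
--             if pending is not None:
--                 unoptimized.extend(pending)
--                 pending = None
--             unoptimized.append(tok)
--     if pending is not None:
--         unoptimized.extend(pending)
--
--     baseline = [subpaths[s] if s.startswith('1111') else s for s in baseline]
--     return unoptimized == baseline, unoptimized
-- ===== Notes on version B (the rewrite author's own statement) =====
-- stated objective: alternative
-- what changed: Replaces A's index-based while-loop with explicit look-ahead (optimized[i+1]) and manual i skipping by a single for-loop state machine carrying a 'pending' subpath that is multiplied, flushed or emitted as later tokens arrive.
import Mathlib
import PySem

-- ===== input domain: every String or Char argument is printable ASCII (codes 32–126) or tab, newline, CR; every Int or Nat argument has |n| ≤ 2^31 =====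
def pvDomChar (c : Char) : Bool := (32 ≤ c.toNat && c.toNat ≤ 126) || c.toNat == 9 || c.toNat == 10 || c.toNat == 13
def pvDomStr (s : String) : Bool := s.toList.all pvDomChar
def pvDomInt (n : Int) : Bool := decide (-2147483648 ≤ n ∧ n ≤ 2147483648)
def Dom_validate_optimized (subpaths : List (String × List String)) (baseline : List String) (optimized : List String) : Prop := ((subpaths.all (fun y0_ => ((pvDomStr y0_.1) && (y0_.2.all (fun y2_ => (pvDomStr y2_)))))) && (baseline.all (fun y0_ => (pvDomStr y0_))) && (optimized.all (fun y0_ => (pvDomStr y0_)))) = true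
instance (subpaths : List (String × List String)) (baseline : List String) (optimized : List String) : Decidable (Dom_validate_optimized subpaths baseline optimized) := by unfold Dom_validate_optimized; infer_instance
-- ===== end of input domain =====

-- B replaces A's index-based look-ahead loop by a pending-subpath state machine (objective: alternative decomposition; same cost).

-- ===== PORT A =====
-- shared primitive steps (identical lines in both Pythons): dict lookup `subpaths[t][:]`
-- (KeyError excluded by Pre_) and `int(t, 16)` (ValueError excluded by Pre_).
def pvLookup (subpaths : List (String × List String)) (t : String) : List String :=
  (subpaths.lookup t).getD []

def pvCount (t : String) : Int := (PySem.Int.ofStrBase? t 16).getD 0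

-- the baseline comprehension `[subpaths[s] if s.startswith('1111') else s for s in baseline]`
-- produces a mixed list (strings and lists); modelled with a Sum.
def pvBaseMap (subpaths : List (String × List String)) (baseline : List String) :
    List (String ⊕ List String) :=
  baseline.map (fun s => if PySem.Str.startswith s "1111" then Sum.inr (pvLookup subpaths s) else Sum.inl s)

-- Python `unoptimized == baseline` on that mixed list: a string never equals a list.
def pvEqMixed : List String → List (String ⊕ List String) → Bool
  | [], [] => true
  | x :: xs, Sum.inl y :: ys => x == y && pvEqMixed xs ys
  | _ :: _, Sum.inr _ :: _ => false
  | _, _ => false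

-- A's while-loop over index i, transcribed as recursion consuming one token (or an id
-- plus its following count token, exactly as `i += 1; i += 1` does).
def loopA (subpaths : List (String × List String)) : List String → List String
  | [] => []
  | [t] =>
    if PySem.Str.startswith t "1111" then pvLookup subpaths t else [t]
  | t :: t2 :: rest =>
    if PySem.Str.startswith t "1111" then
      if PySem.Str.startswith t2 "0000" then
        PySem.List.pyRepeat (pvLookup subpaths t) (pvCount t2) ++ loopA subpaths rest
      else
        pvLookup subpaths t ++ loopA subpaths (t2 :: rest)
    else
      t :: loopA subpaths (t2 :: rest)

def validate_optimized (subpaths : List (String × List String)) (baseline : List String) (optimized : List String) : Bool × List String :=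
  let unoptimized := loopA subpaths optimized
  (pvEqMixed unoptimized (pvBaseMap subpaths baseline), unoptimized)

-- ===== PORT B =====
def pvFlush : Option (List String) → List String
  | none => []
  | some sp => sp

-- B's single `for tok in optimized` loop carrying the pending subpath.
def loopB (subpaths : List (String × List String)) : Option (List String) → List String → List String
  | pending, [] => pvFlush pending
  | pending, t :: rest =>
    if PySem.Str.startswith t "1111" then
      pvFlush pending ++ loopB subpaths (some (pvLookup subpaths t)) rest
    else if PySem.Str.startswith t "0000" then
      match pending with
      | some sp => PySem.List.pyRepeat sp (pvCount t) ++ loopB subpaths none rest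
      | none => t :: loopB subpaths none rest
    else
      pvFlush pending ++ (t :: loopB subpaths none rest)

def validate_optimized_alt (subpaths : List (String × List String)) (baseline : List String) (optimized : List String) : Bool × List String :=
  let unoptimized := loopB subpaths none optimized
  (pvEqMixed unoptimized (pvBaseMap subpaths baseline), unoptimized)

-- ===== PRECONDITION & SPEC =====
-- Pre_ excludes exactly the inputs on which Python A raises: a '1111…' token (in optimized
-- or baseline) missing from subpaths (KeyError), or a '0000…' token right after a '1111…'
-- token that is not a valid base-16 int literal (ValueError).
def Pre_validate_optimized (subpaths : List (String × List String)) (baseline : List String) (optimized : List String) : Prop :=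
  (∀ t ∈ optimized, PySem.Str.startswith t "1111" = true → (subpaths.lookup t).isSome = true) ∧
  (∀ p ∈ optimized.zip optimized.tail,
      PySem.Str.startswith p.1 "1111" = true → PySem.Str.startswith p.2 "0000" = true →
      (PySem.Int.ofStrBase? p.2 16).isSome = true) ∧
  (∀ t ∈ baseline, PySem.Str.startswith t "1111" = true → (subpaths.lookup t).isSome = true)

instance (subpaths : List (String × List String)) (baseline : List String) (optimized : List String) : Decidable (Pre_validate_optimized subpaths baseline optimized) := by unfold Pre_validate_optimized; infer_instance

def pvWitness_validate_optimized : (List (String × List String)) × List String × List String :=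
  ([("1111a", ["p", "q"])], ["p", "q", "x"], ["1111a", "0002"])

def Spec_validate_optimized (subpaths : List (String × List String)) (baseline : List String) (optimized : List String) (out : Bool × List String) : Prop := out = validate_optimized_alt subpaths baseline optimized
instance (subpaths : List (String × List String)) (baseline : List String) (optimized : List String) (out : Bool × List String) : Decidable (Spec_validate_optimized subpaths baseline optimized out) := by unfold Spec_validate_optimized; infer_instance

-- ===== CLAIM (what is proved, stated in full; the proofs are below) =====
def Claim_equal_validate_optimized : Prop := ∀ (subpaths : List (String × List String)) (baseline : List String) (optimized : List String), Dom_validate_optimized subpaths baseline optimized → Pre_validate_optimized subpaths baseline optimized → Spec_validate_optimized subpaths baseline optimized (validate_optimized subpaths baseline optimized)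

-- ===== LEMMAS AND PROOFS =====

-- a token cannot start with both "1111" and "0000"
theorem not_both_prefixes {cs : List Char}
    (h : PySem.Chars.startswith cs ['1', '1', '1', '1'] = true) :
    PySem.Chars.startswith cs ['0', '0', '0', '0'] = false := by
  by_contra hc
  rw [Bool.not_eq_false] at hc
  rw [PySem.Chars.startswith_iff] at h hc
  rcases h with ⟨u, hu⟩
  rcases hc with ⟨v, hv⟩
  rw [← hv] at hu
  subst hv
  simp at hu

-- what loopB computes, phrased through loopA and the pending state
def specB (subpaths : List (String × List String)) : Option (List String) → List String → List String
  | none, l => loopA subpaths l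
  | some sp, [] => sp
  | some sp, t :: rest =>
    if PySem.Str.startswith t "0000" then
      PySem.List.pyRepeat sp (pvCount t) ++ loopA subpaths rest
    else
      sp ++ loopA subpaths (t :: rest)

theorem specB_none (subpaths : List (String × List String)) (l : List String) :
    specB subpaths none l = loopA subpaths l := by
  cases l <;> rfl

theorem loopB_eq_specB (subpaths : List (String × List String)) (l : List String) :
    ∀ pending, loopB subpaths pending l = specB subpaths pending l := by
  induction l with
  | nil =>
    intro pending
    cases pending <;> rfl
  | cons t rest ih =>
    intro pending
    by_cases h1 : PySem.Chars.startswith t.toList ['1', '1', '1', '1'] = true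
    · have h0 := not_both_prefixes h1
      have hA : loopA subpaths (t :: rest) = specB subpaths (some (pvLookup subpaths t)) rest := by
        cases rest with
        | nil => simp [loopA, specB, h1]
        | cons t2 rest2 =>
          by_cases h2 : PySem.Chars.startswith t2.toList ['0', '0', '0', '0'] = true
          · simp [loopA, specB, h1, h2]
          · simp [loopA, specB, h1, h2]
      cases pending with
      | none =>
        simp only [loopB, specB]
        simp [h1, pvFlush, ih _, hA]
      | some sp =>
        simp only [loopB, specB]
        simp [h1, h0, pvFlush, ih _, hA]
    · rw [Bool.not_eq_true] at h1
      have htail : loopA subpaths (t :: rest) = t :: loopA subpaths rest := by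
        cases rest with
        | nil => simp [loopA, h1]
        | cons t2 rest2 => simp [loopA, h1]
      by_cases h2 : PySem.Chars.startswith t.toList ['0', '0', '0', '0'] = true
      · cases pending with
        | none =>
          simp only [loopB, specB]
          simp [h1, h2, ih none, htail, specB_none]
        | some sp =>
          simp only [loopB, specB]
          simp [h1, h2, ih none, specB_none]
      · rw [Bool.not_eq_true] at h2
        cases pending with
        | none =>
          simp only [loopB, specB]
          simp [h1, h2, pvFlush, ih none, htail, specB_none]
        | some sp =>
          simp only [loopB, specB]
          simp [h1, h2, pvFlush, ih none, htail, specB_none]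

theorem loopB_eq_loopA (subpaths : List (String × List String)) (l : List String) :
    loopB subpaths none l = loopA subpaths l :=
  loopB_eq_specB subpaths l none

-- ===== VERDICT (by name: the statement is the Claim_ definition above) =====
theorem validate_optimized_spec : Claim_equal_validate_optimized := by
  intro subpaths baseline optimized _ _
  unfold Spec_validate_optimized validate_optimized validate_optimized_alt
  rw [loopB_eq_loopA]
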